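-- pv_equiv track=rewrite | github.com/Sssssssayana/aaaaa | PythonProject4/text_fun.py | get_matrix_size
-- ===== SOURCE A (Python) =====
-- import math
--
-- def get_matrix_size(text: str) -> tuple:
--     """Определяет оптимальный размер матрицы для текста"""
--     text_len = len(text)
--     sqrt = math.ceil(math.sqrt(text_len))
--
--     # Находим оптимальные размеры матрицы
--     for cols in range(sqrt, text_len + 1):
--         rows = math.ceil(text_len / cols)
--         if rows <= cols:  # Предпочитаем матрицу, где строк не больше чем столбцов
--             return rows, cols
--     return sqrt, sqrt
-- ===== SOURCE B (Python) =====
-- import math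
--
-- def get_matrix_size(text: str) -> tuple:
--     """Определяет оптимальный размер матрицы для текста"""
--     text_len = len(text)
--     cols = math.ceil(math.sqrt(text_len))
--     rows = math.ceil(text_len / cols)
--     return rows, cols
-- ===== Notes on version B (the rewrite author's own statement) =====
-- stated objective: simpler
-- what changed: Replaced the search loop over candidate column counts by the closed form cols = ceil(sqrt(n)), rows = ceil(n/cols): the first candidate already satisfies rows <= cols, so the loop and its dead fallback disappear.
import Mathlib
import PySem

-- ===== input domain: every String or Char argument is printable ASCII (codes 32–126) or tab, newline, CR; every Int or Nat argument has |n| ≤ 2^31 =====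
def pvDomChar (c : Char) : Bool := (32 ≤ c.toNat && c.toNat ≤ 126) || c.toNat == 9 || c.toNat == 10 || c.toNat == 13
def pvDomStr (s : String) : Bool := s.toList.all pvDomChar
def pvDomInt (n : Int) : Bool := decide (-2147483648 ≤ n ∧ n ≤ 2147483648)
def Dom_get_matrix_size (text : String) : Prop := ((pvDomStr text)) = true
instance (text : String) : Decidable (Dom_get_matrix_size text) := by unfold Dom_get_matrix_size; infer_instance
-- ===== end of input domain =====

-- B replaces A's candidate-search loop by the closed form (ceil(n/c), c) with c = ceil(sqrt n); simpler, same values.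

-- ===== PORT A =====
-- math.ceil(math.sqrt n) for a Nat n (exact integer ceiling square root)
def ceilSqrt (n : Nat) : Nat := if Nat.sqrt n * Nat.sqrt n = n then Nat.sqrt n else Nat.sqrt n + 1
-- math.ceil(n / c) for Nats with c > 0 (exact integer ceiling division)
def ceilDiv (n c : Nat) : Nat := (n + c - 1) / c
-- the 'for cols in range(sqrt, text_len + 1)' loop with its early return
def loopA (n : Nat) : List Nat → Option (Int × Int)
  | [] => none
  | c :: rest =>
      let rows := ceilDiv n c
      if rows ≤ c then some ((rows : Int), (c : Int)) else loopA n rest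

def get_matrix_size (text : String) : Int × Int :=
  let n := text.toList.length
  let s := ceilSqrt n
  match loopA n (List.range' s (n + 1 - s)) with
  | some p => p
  | none => ((s : Int), (s : Int))

-- ===== PORT B =====
def get_matrix_size_alt (text : String) : Int × Int :=
  let n := text.toList.length
  let c := ceilSqrt n
  ((ceilDiv n c : Int), (c : Int))

-- ===== PRECONDITION & SPEC =====
-- Pre_ excludes only the empty string, on which both A and B raise ZeroDivisionError.
def Pre_get_matrix_size (text : String) : Prop := text ≠ ""
instance (text : String) : Decidable (Pre_get_matrix_size text) := by unfold Pre_get_matrix_size; infer_instance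
def pvWitness_get_matrix_size : String := "hello"
def Spec_get_matrix_size (text : String) (out : Int × Int) : Prop := out = get_matrix_size_alt text
instance (text : String) (out : Int × Int) : Decidable (Spec_get_matrix_size text out) := by unfold Spec_get_matrix_size; infer_instance

-- ===== CLAIM (what is proved, stated in full; the proofs are below) =====
def Claim_equal_get_matrix_size : Prop := ∀ (text : String), Dom_get_matrix_size text → Pre_get_matrix_size text → Spec_get_matrix_size text (get_matrix_size text)

-- ===== LEMMAS AND PROOFS =====

lemma ceilSqrt_sq_ge (n : Nat) : n ≤ ceilSqrt n * ceilSqrt n := by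
  unfold ceilSqrt
  split_ifs with h
  · omega
  · have := Nat.lt_succ_sqrt n
    nlinarith [Nat.sqrt_le_self n]

lemma ceilSqrt_pos (n : Nat) (hn : 1 ≤ n) : 1 ≤ ceilSqrt n := by
  unfold ceilSqrt
  split_ifs with h
  · by_contra hc
    interval_cases (Nat.sqrt n)
    omega
  · omega

lemma ceilSqrt_le (n : Nat) (hn : 1 ≤ n) : ceilSqrt n ≤ n := by
  unfold ceilSqrt
  split_ifs with h
  · exact Nat.sqrt_le_self n
  · rcases Nat.lt_or_ge n 2 with h2 | h2
    · interval_cases n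
      · simp [Nat.sqrt] at h
    · have := Nat.sqrt_lt_self (by omega : 1 < n)
      omega

lemma ceilDiv_le_self_sqrt (n : Nat) (hn : 1 ≤ n) :
    ceilDiv n (ceilSqrt n) ≤ ceilSqrt n := by
  unfold ceilDiv
  have hs := ceilSqrt_pos n hn
  have hsq := ceilSqrt_sq_ge n
  set s := ceilSqrt n with hsdef
  have hm : s * (s + 1) = s * s + s := by ring
  have hm2 : (s + 1) * s = s * s + s := by ring
  have := (Nat.div_lt_iff_lt_mul (by omega : 0 < s)).mpr (by omega : n + s - 1 < (s + 1) * s)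
  omega

-- ===== VERDICT (by name: the statement is the Claim_ definition above) =====
theorem get_matrix_size_spec : Claim_equal_get_matrix_size := by
  intro text _ hpre
  unfold Spec_get_matrix_size get_matrix_size get_matrix_size_alt
  have hn : 1 ≤ text.toList.length := by
    rcases Nat.eq_zero_or_pos text.toList.length with h0 | h1
    · exact absurd (String.toList_eq_nil_iff.mp (List.eq_nil_of_length_eq_zero h0)) hpre
    · exact h1
  set n := text.toList.length with hndef
  have hs1 := ceilSqrt_pos n hn
  have hs2 := ceilSqrt_le n hn
  have hcond := ceilDiv_le_self_sqrt n hn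
  have hrange : List.range' (ceilSqrt n) (n + 1 - ceilSqrt n) =
      ceilSqrt n :: List.range' (ceilSqrt n + 1) (n - ceilSqrt n) := by
    have : n + 1 - ceilSqrt n = (n - ceilSqrt n) + 1 := by omega
    rw [this, List.range'_succ]
  simp only [hrange, loopA, hcond, if_pos]
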